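-- pv_equiv track=rewrite | github.com/LLinville/misc_code | advent2018/prob8-1/advent 2018 8-2.py | metadata_total
-- ===== SOURCE A (Python) =====
-- def metadata_total(remaining_data):
--     number_of_children = remaining_data.pop(0)
--     metadata_length = remaining_data.pop(0)
--
--     child_values = [metadata_total(remaining_data) for _ in range(number_of_children)]
--     current_metadata = [remaining_data.pop(0) for _ in range(metadata_length)]
--
--     if number_of_children == 0:
--         return sum(current_metadata)
--     return sum([child_values[child_index-1] for child_index in current_metadata if 0 < child_index <= number_of_children])
-- ===== SOURCE B (Python) =====
-- # Iterative depth-first walk with an explicit stack of open nodes instead of the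
-- # original's recursion; return-value equivalent, but B does not mutate/empty its
-- # argument list (A pops it empty in place).
--
-- def _node_value(n_children, child_values, metadata):
--     if n_children == 0:
--         return sum(metadata)
--     return sum(child_values[i - 1] for i in metadata if 0 < i <= n_children)
--
--
-- def metadata_total(remaining_data):
--     pos = 0
--     stack = []  # open nodes: [n_children, children_still_to_read, metadata_length, child_values]
--     while True:
--         # open the next node
--         stack.append([remaining_data[pos], remaining_data[pos], remaining_data[pos + 1], []])
--         pos += 2
--         while True:
--             frame = stack[-1]
--             if frame[1] > 0:
--                 # this node still expects a child: go read it
--                 frame[1] -= 1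
--                 break
--             # all children read: collect the metadata and compute this node's value
--             stack.pop()
--             metadata = []
--             for _ in range(frame[2]):
--                 metadata.append(remaining_data[pos])
--                 pos += 1
--             value = _node_value(frame[0], frame[3], metadata)
--             if not stack:
--                 return value
--             stack[-1][3].append(value)
-- ===== Notes on version B (the rewrite author's own statement) =====
-- stated objective: alternative
-- what changed: Replaces A's recursive descent (which destructively pops tokens off the front of the list) with an iterative depth-first walk over an index and an explicit stack of open-node frames, each holding the node's remaining child quota, metadata length and accumulated child values; the return value is identical, but B does not mutate/empty its argument list.
import Mathlib
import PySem

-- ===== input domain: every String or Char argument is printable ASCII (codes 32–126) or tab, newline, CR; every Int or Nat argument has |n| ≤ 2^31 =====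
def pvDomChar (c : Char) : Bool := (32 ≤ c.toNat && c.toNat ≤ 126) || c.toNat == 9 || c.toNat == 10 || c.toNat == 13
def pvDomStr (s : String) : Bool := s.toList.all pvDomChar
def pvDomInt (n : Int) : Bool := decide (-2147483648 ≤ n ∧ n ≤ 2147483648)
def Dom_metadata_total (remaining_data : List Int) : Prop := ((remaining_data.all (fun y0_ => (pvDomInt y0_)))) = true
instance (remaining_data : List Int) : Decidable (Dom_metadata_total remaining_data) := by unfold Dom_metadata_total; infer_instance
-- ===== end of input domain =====

-- B replaces A's recursive descent by an iterative depth-first walk with an explicit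
-- stack of open nodes (different decomposition); equivalence is about the RETURN
-- value only: A empties its argument list in place, B does not mutate it.

-- value of one node: sum of metadata for a leaf, else sum of metadata-indexed child
-- values with the 0 < idx <= n guard (identical rule in both Pythons)
def pvNodeValue (n : Int) (vals : List Int) (md : List Int) : Int :=
  if n == 0 then md.sum
  else ((md.filter (fun i => decide (0 < i) && decide (i ≤ n))).map
        (fun i => (PySem.List.pyGet? vals (i - 1)).getD 0)).sum

-- ===== PORT A =====
-- recursive parse; pop(0) of the two header ints, then the children by recursion,
-- then metadata_length pops of metadata (range(m) is empty for m ≤ 0, i.e. m.toNat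
-- pops; none = IndexError).  The subtype certificate only records list shrinkage
-- for termination; the computation is A's.
mutual
def pvGoA : (l : List Int) → Option (Int × {r : List Int // r.length + 2 ≤ l.length})
  | c :: m :: rest =>
    match pvChildrenA c.toNat rest with
    | none => none
    | some (vs, ⟨r1, h1⟩) =>
      if hm : m.toNat ≤ r1.length then
        some (pvNodeValue c vs (r1.take m.toNat),
              ⟨r1.drop m.toNat, by simp; omega⟩)
      else none
  | _ => none
termination_by l => (l.length, 0)

def pvChildrenA : (k : Nat) → (l : List Int) → Option (List Int × {r : List Int // r.length ≤ l.length})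
  | 0, l => some ([], ⟨l, le_refl _⟩)
  | Nat.succ k, l =>
    match pvGoA l with
    | none => none
    | some (v, ⟨r, h⟩) =>
      match pvChildrenA k r with
      | none => none
      | some (vs, ⟨r', h'⟩) => some (v :: vs, ⟨r', by omega⟩)
termination_by k l => (l.length, k + 1)
end

def metadata_total (remaining_data : List Int) : Int :=
  match pvGoA remaining_data with
  | some (v, _) => v
  | none => 0  -- unreachable under Pre_ (Python raises IndexError there)

-- ===== PORT B =====
-- iterative depth-first walk over the token list with an explicit stack of frames
-- (n_children, children_still_to_read, metadata_length, child_values); pvGoB opens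
-- the next node, pvCloseB either descends (decrementing the child quota) or closes
-- the finished top frame and passes its value to the parent
mutual
def pvGoB (stack : List (Int × Int × Int × List Int)) (data : List Int) : Option Int :=
  match data with
  | a :: b :: rest => pvCloseB ((a, a, b, []) :: stack) rest
  | _ => none
termination_by (2 * data.length + stack.length, 0)

def pvCloseB (stack : List (Int × Int × Int × List Int)) (data : List Int) : Option Int :=
  match stack with
  | [] => none
  | (n, need, m, vals) :: st =>
    if 0 < need then pvGoB ((n, need - 1, m, vals) :: st) data
    else
      if _hk : m.toNat ≤ data.length then
        let v := pvNodeValue n vals (data.take m.toNat)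
        match st with
        | [] => some v
        | (n', need', m', vals') :: st' =>
          pvCloseB ((n', need', m', vals' ++ [v]) :: st') (data.drop m.toNat)
      else none
termination_by (2 * data.length + stack.length, 1)
end

def metadata_total_alt (remaining_data : List Int) : Int :=
  (pvGoB [] remaining_data).getD 0

-- ===== PRECONDITION & SPEC =====
-- the grammar of the input: the list starts with one complete node encoding
-- (header n m, then n child nodes, then m metadata entries); exactly the inputs on
-- which Python A returns instead of raising IndexError.  pvCheck only checks this
-- shape (a stack of pending (children-still-needed, metadata-length) pairs); it
-- computes no values.
def pvCheck : Nat → List (Int × Int) → List Int → Bool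
  | 0, _, _ => false
  | _, [], _ => true
  | steps + 1, (c, m) :: st, data =>
    if 0 < c then
      match data with
      | a :: b :: rest => pvCheck steps ((a, b) :: (c - 1, m) :: st) rest
      | _ => false
    else if m.toNat ≤ data.length then pvCheck steps st (data.drop m.toNat)
    else false

-- The first argument of pvCheck is an a-priori step bound, not a semantic cut-off:
-- every check step either consumes input tokens or pops a pending frame, so a run
-- from stack [(1,0)] makes at most 2*length+1 steps and the bound below is never hit.
def Pre_metadata_total (remaining_data : List Int) : Prop :=
  pvCheck (2 * remaining_data.length + 2) [(1, 0)] remaining_data = true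
instance (remaining_data : List Int) : Decidable (Pre_metadata_total remaining_data) := by
  unfold Pre_metadata_total; infer_instance

def pvWitness_metadata_total : List Int := [2, 2, 0, 1, 7, 0, 0, 1, 2]

def Spec_metadata_total (remaining_data : List Int) (out : Int) : Prop := out = metadata_total_alt remaining_data
instance (remaining_data : List Int) (out : Int) : Decidable (Spec_metadata_total remaining_data out) := by unfold Spec_metadata_total; infer_instance

-- ===== CLAIM (what is proved, stated in full; the proofs are below) =====
def Claim_equal_metadata_total : Prop := ∀ (remaining_data : List Int), Dom_metadata_total remaining_data → Pre_metadata_total remaining_data → Spec_metadata_total remaining_data (metadata_total remaining_data)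

-- ===== LEMMAS AND PROOFS =====

-- what B does once a finished child's value v arrives with leftover tokens r
-- (the parent's quota was already decremented when it descended)
def pvResume (stack : List (Int × Int × Int × List Int)) (v : Int) (r : List Int) : Option Int :=
  match stack with
  | [] => some v
  | (n', need', m', vals') :: st' => pvCloseB ((n', need', m', vals' ++ [v]) :: st') r

-- simulation statement: a successful A-parse of one node is matched by B's walk
def pvMstmt (l : List Int) : Prop :=
  ∀ (p : Int × {r : List Int // r.length + 2 ≤ l.length}), pvGoA l = some p →
    ∀ stack, pvGoB stack l = pvResume stack p.1 p.2.1

theorem pvC_sim (L : Nat) (HM : ∀ l : List Int, l.length ≤ L → pvMstmt l) :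
    ∀ (k : Nat) (l : List Int), l.length ≤ L →
    ∀ (q : List Int × {r : List Int // r.length ≤ l.length}), pvChildrenA k l = some q →
    ∀ (n m : Int) (acc : List Int) (st : List (Int × Int × Int × List Int)),
      pvCloseB ((n, (k : Int), m, acc) :: st) l = pvCloseB ((n, 0, m, acc ++ q.1) :: st) q.2.1 := by
  intro k
  induction k with
  | zero =>
    intro l hL q hq n m acc st
    simp [pvChildrenA] at hq
    rw [← hq]
    simp
  | succ k IH =>
    intro l hL q hq n m acc st
    rcases hg : pvGoA l with _ | ⟨v, r1, h1⟩ <;> simp [pvChildrenA, hg] at hq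
    rcases hch : pvChildrenA k r1 with _ | ⟨vs, r2, h2⟩ <;> simp [hch] at hq
    have hcast : ((k : Int) + 1) - 1 = (k : Int) := by ring
    have hpos : (0 : Int) < (k : Int) + 1 := by positivity
    have h1' := HM l hL (v, ⟨r1, h1⟩) hg ((n, (k : Int), m, acc) :: st)
    have h2' := IH r1 (by omega) (vs, ⟨r2, h2⟩) hch n m (acc ++ [v]) st
    rw [← hq]
    push_cast
    rw [pvCloseB]
    simp only [hpos, if_pos, hcast]
    rw [h1']
    simp only [pvResume]
    rw [h2']
    simp

theorem pvM_sim : ∀ l : List Int, pvMstmt l := by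
  have key : ∀ (N : Nat) (l : List Int), l.length ≤ N → pvMstmt l := by
    intro N
    induction N with
    | zero =>
      intro l hl p hp stack
      cases l with
      | nil => simp [pvGoA.eq_def] at hp
      | cons a t => simp only [List.length_cons] at hl; omega
    | succ N IH =>
      intro l hl p hp stack
      match l with
      | [] => simp [pvGoA.eq_def] at hp
      | [c] => simp [pvGoA.eq_def] at hp
      | c :: m :: rest =>
        rcases hch : pvChildrenA c.toNat rest with _ | ⟨vs, r1, h1⟩
        · simp only [pvGoA, hch] at hp
          exact absurd hp (by simp)
        simp only [pvGoA, hch] at hp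
        by_cases hm : m.toNat ≤ r1.length
        swap
        · rw [dif_neg hm] at hp
          exact absurd hp (by simp)
        rw [dif_pos hm] at hp
        have hstep : ∀ need : Int, ¬ 0 < need →
            pvCloseB ((c, need, m, vs) :: stack) r1 = pvResume stack p.1 p.2.1 := by
          intro need hneed
          rw [← Option.some.inj hp]
          dsimp only
          rw [pvCloseB]
          simp only [hneed, hm, dif_pos]
          cases stack with
          | nil => simp [pvResume]
          | cons f st => rcases f with ⟨n', need', m', vals'⟩; simp [pvResume]
        rw [pvGoB]
        by_cases hc : 0 < c
        · have hcast : ((c.toNat : Nat) : Int) = c := Int.toNat_of_nonneg (by omega)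
          have HM' : ∀ l' : List Int, l'.length ≤ rest.length → pvMstmt l' := by
            intro l' h'
            exact IH l' (by simp at hl; omega)
          have hsim := pvC_sim rest.length HM' c.toNat rest le_rfl (vs, ⟨r1, h1⟩) hch c m [] stack
          rw [hcast] at hsim
          simp only [List.nil_append] at hsim
          rw [hsim]
          exact hstep 0 (by omega)
        · have hc0 : c.toNat = 0 := by omega
          rw [hc0] at hch
          simp [pvChildrenA] at hch
          obtain ⟨hvs, hr1⟩ := hch
          subst hvs
          subst hr1
          exact hstep c hc
  exact fun l => key l.length l le_rfl

-- the grammar check implies A's parse succeeds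
def pvRun : List (Int × Int) → List Int → Prop
  | [], _ => True
  | (c, m) :: st, d =>
      ∃ (q : List Int × {r : List Int // r.length ≤ d.length}),
        pvChildrenA c.toNat d = some q ∧ m.toNat ≤ q.2.1.length ∧ pvRun st (q.2.1.drop m.toNat)

theorem pvRun_of_check : ∀ (steps : Nat) (st : List (Int × Int)) (d : List Int), pvCheck steps st d = true → pvRun st d := by
  intro steps st d
  induction steps, st, d using pvCheck.induct with
  | case1 st d => intro h; simp [pvCheck] at h
  | case2 steps d => intro _; simp [pvRun]
  | case3 steps c m st hc a b rest IH =>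
    intro h
    rw [pvCheck.eq_def] at h
    simp only [hc, if_pos] at h
    have hrun := IH h
    obtain ⟨⟨vs1, r1, hr1⟩, hch1, hm1, hrun1⟩ := hrun
    dsimp only at hm1 hrun1
    obtain ⟨⟨vs2, r2, hr2⟩, hch2, hm2, hrun2⟩ := hrun1
    dsimp only at hch2 hr2 hm2 hrun2
    have hgo : pvGoA (a :: b :: rest) =
        some (pvNodeValue a vs1 (r1.take b.toNat), ⟨r1.drop b.toNat, by simp; omega⟩) := by
      simp [pvGoA, hch1, hm1]
    have hc' : c.toNat = (c - 1).toNat + 1 := by omega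
    refine ⟨(pvNodeValue a vs1 (r1.take b.toNat) :: vs2, ⟨r2, ?_⟩), ?_, hm2, hrun2⟩
    · simp only [List.length_drop] at hr2
      simp only [List.length_cons]
      omega
    · rw [hc']
      simp only [pvChildrenA, hgo, hch2]
  | case4 steps c m st data hc hdata =>
    intro h
    rw [pvCheck.eq_def] at h
    simp only [hc, if_pos] at h
    rcases data with _ | ⟨a, t⟩
    · simp at h
    rcases t with _ | ⟨b, rest⟩
    · simp at h
    exact absurd rfl (hdata a b rest)
  | case5 steps c m st data hc hm IH =>
    intro h
    rw [pvCheck.eq_def] at h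
    simp only [hc, hm, if_pos] at h
    have hc0 : c.toNat = 0 := by omega
    refine ⟨([], ⟨data, le_rfl⟩), ?_, hm, IH h⟩
    rw [hc0]
    simp [pvChildrenA]
  | case6 steps c m st data hc hm =>
    intro h
    rw [pvCheck.eq_def] at h
    simp [hc, hm] at h

theorem pvGoA_some_of_pre (l : List Int) (h : Pre_metadata_total l) :
    ∃ p, pvGoA l = some p := by
  have hrun := pvRun_of_check (2 * l.length + 2) [(1, 0)] l h
  obtain ⟨⟨vs, r, hr⟩, hch, -, -⟩ := hrun
  rcases hg : pvGoA l with _ | p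
  · rw [show ((1 : Int)).toNat = 1 from rfl] at hch
    simp [pvChildrenA, hg] at hch
  · exact ⟨p, rfl⟩

-- ===== VERDICT (by name: the statement is the Claim_ definition above) =====
theorem metadata_total_spec : Claim_equal_metadata_total := by
  intro l _ hPre
  obtain ⟨p, hp⟩ := pvGoA_some_of_pre l hPre
  have hb := pvM_sim l p hp []
  unfold Spec_metadata_total metadata_total metadata_total_alt
  rw [hp, hb]
  rfl
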